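-- pv_equiv track=rewrite | github.com/WangYuxuan93/CVLUE | evaluation/caption/rouge_n.py | cook_test
-- ===== SOURCE A (Python) =====
-- from collections import defaultdict
--
-- def precook(s, n = 4):
--
--     words = s.replace(" ","")
--     counts = defaultdict(int)
--
--     for k in range(1,n+1):
--         for i in range(len(words)-k+1):
--             ngram = words[i:i+k]
--             counts[ngram] += 1
--
--     return counts
--
-- def cook_test(test, refparam, n=4):
--
--     reflen,refmaxcounts = refparam[0],refparam[1]
--     counts = precook(test, n)
--
--     result = {}
--
--     result["guess"] = [max(0,reflen-k+1) for k in range(1,n+1)]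
--
--     result['correct'] = [0]*n
--     for (ngram, count) in counts.items():
--         result["correct"][len(ngram)-1] += min(refmaxcounts.get(ngram,0), count)
--
--     return result
-- ===== SOURCE B (Python) =====
-- def cook_test(test, refparam, n=4):
--     reflen, refmaxcounts = refparam[0], refparam[1]
--     words = test.replace(" ", "")
--     correct = [0] * max(0, n)
--     for gram, cap in refmaxcounts.items():
--         k = len(gram)
--         if 1 <= k <= n:
--             occ = sum(words[i:i + k] == gram for i in range(len(words) - k + 1))
--             if occ:
--                 correct[k - 1] += min(cap, occ)
--     return {"guess": [max(0, reflen - k + 1) for k in range(1, n + 1)],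
--             "correct": correct}
-- ===== Notes on version B (the rewrite author's own statement) =====
-- stated objective: alternative
-- what changed: B inverts the traversal: instead of enumerating and counting all n-gram occurrences of the test string into a dict and looking each one up in the reference, B builds no counter at all and loops once over the reference dict's items, counting each reference gram's occurrences in the stripped test string directly and adding the clipped minimum into its length slot; cost moves from O(n*L) over test grams to O(|ref|*L) over reference grams.
import Mathlib
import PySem

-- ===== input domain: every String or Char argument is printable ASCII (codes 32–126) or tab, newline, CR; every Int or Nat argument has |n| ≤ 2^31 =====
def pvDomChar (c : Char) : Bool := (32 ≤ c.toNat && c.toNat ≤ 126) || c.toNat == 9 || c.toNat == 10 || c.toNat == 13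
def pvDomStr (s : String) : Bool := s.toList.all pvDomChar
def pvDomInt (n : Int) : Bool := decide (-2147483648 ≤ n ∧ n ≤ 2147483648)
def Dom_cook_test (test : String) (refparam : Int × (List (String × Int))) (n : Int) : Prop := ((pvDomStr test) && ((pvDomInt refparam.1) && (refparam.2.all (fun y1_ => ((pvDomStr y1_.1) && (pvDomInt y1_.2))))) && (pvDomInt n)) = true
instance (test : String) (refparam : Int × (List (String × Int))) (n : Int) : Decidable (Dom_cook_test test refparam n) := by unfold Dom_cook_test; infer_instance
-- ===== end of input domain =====

-- B inverts the traversal: it builds no n-gram counter of the test at all, but loops once over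
-- the reference dict's items, counting each reference gram's occurrences in the stripped test
-- string directly and adding the clipped minimum into its length slot (objective: alternative).


-- ===== PORT A =====
def precook (s : String) (n : Int) : PySem.Dict String Int :=
  let words := PySem.Str.replace s " " ""
  (PySem.List.pyRange 1 (n + 1) 1).foldl (fun counts k =>
    (PySem.List.pyRange 0 ((words.length : Int) - k + 1) 1).foldl (fun counts i =>
      let ngram := PySem.Str.slice words (some i) (some (i + k))
      counts.modify ngram 0 (· + 1)) counts) PySem.Dict.empty

def cook_test (test : String) (refparam : Int × (List (String × Int))) (n : Int) : List (String × List Int) :=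
  let reflen := refparam.1
  let refmaxcounts := PySem.Dict.ofList refparam.2
  let counts := precook test n
  let guess : List Int := (PySem.List.pyRange 1 (n + 1) 1).map (fun k => max 0 (reflen - k + 1))
  let correct : List Int := counts.items.foldl (fun acc p =>
    let idx : Int := (p.1.length : Int) - 1
    PySem.List.pySetD acc idx
      (PySem.List.pyGetD acc idx 0 + min (refmaxcounts.getD p.1 0) p.2))
    (List.replicate n.toNat 0)
  [("guess", guess), ("correct", correct)]

-- ===== PORT B =====
-- occ = sum(words[i:i+k] == gram for i in range(len(words)-k+1))
def bOcc (words : String) (k : Int) (g : String) : Int :=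
  ((PySem.List.pyRange 0 ((words.length : Int) - k + 1) 1).map
    (fun i => if PySem.Str.slice words (some i) (some (i + k)) == g then (1 : Int) else 0)).sum

-- the body of B's single loop over refmaxcounts.items()
def bUpd (words : String) (n : Int) (acc : List Int) (p : String × Int) : List Int :=
  let k : Int := (p.1.length : Int)
  if 1 ≤ k ∧ k ≤ n then
    if bOcc words k p.1 ≠ 0 then
      PySem.List.pySetD acc (k - 1)
        (PySem.List.pyGetD acc (k - 1) 0 + min p.2 (bOcc words k p.1))
    else acc
  else acc

def cook_test_alt (test : String) (refparam : Int × (List (String × Int))) (n : Int) : List (String × List Int) :=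
  let reflen := refparam.1
  let refmaxcounts := PySem.Dict.ofList refparam.2
  let words := PySem.Str.replace test " " ""
  let correct : List Int := refmaxcounts.items.foldl (bUpd words n) (List.replicate n.toNat 0)
  [("guess", (PySem.List.pyRange 1 (n + 1) 1).map (fun k => max 0 (reflen - k + 1))),
   ("correct", correct)]

-- ===== PRECONDITION & SPEC =====
def Spec_cook_test (test : String) (refparam : Int × (List (String × Int))) (n : Int) (out : List (String × List Int)) : Prop := out = cook_test_alt test refparam n
instance (test : String) (refparam : Int × (List (String × Int))) (n : Int) (out : List (String × List Int)) : Decidable (Spec_cook_test test refparam n out) := by unfold Spec_cook_test; infer_instance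

-- ===== CLAIM (what is proved, stated in full; the proofs are below) =====
def Claim_equal_cook_test : Prop := ∀ (test : String) (refparam : Int × (List (String × Int))) (n : Int), Dom_cook_test test refparam n → Spec_cook_test test refparam n (cook_test test refparam n)

-- ===== LEMMAS AND PROOFS =====

-- the list of length-k substrings of w, in Python's scan order
def pvNgrams (w : String) (k : Int) : List String :=
  (PySem.List.pyRange 0 ((w.length : Int) - k + 1) 1).map
    (fun i => PySem.Str.slice w (some i) (some (i + k)))

-- the min(refmax, count) summand of A, as a function of a counter item
def pvM (rmc : PySem.Dict String Int) (p : String × Int) : Int :=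
  min (rmc.getD p.1 0) p.2

-- the same summand as a function of the gram alone
def pvF (rmc : PySem.Dict String Int) (ngs : List String) (g : String) : Int :=
  min (rmc.getD g 0) ((ngs.count g : Int))

-- A's per-item indexed update
def pvUpd (rmc : PySem.Dict String Int) (acc : List Int) (p : String × Int) : List Int :=
  PySem.List.pySetD acc ((p.1.length : Int) - 1)
    (PySem.List.pyGetD acc ((p.1.length : Int) - 1) 0 + pvM rmc p)

theorem precook_eq (s : String) (n : Int) :
    precook s n = PySem.Dict.counter
      ((PySem.List.pyRange 1 (n + 1) 1).flatMap (pvNgrams (PySem.Str.replace s " " ""))) := by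
  unfold precook pvNgrams
  rw [PySem.Dict.counter_eq_foldl, List.flatMap_def, List.foldl_flatten, List.foldl_map]
  simp only [List.foldl_map]

theorem len_mem_pvNgrams (w : String) (k : Int) (g : String) (hk : 1 ≤ k)
    (hg : g ∈ pvNgrams w k) : g.length = k.toNat := by
  unfold pvNgrams at hg
  rcases List.mem_map.mp hg with ⟨i, hi, rfl⟩
  rcases PySem.List.mem_pyRange_one.mp hi with ⟨h0, h1⟩
  rw [← String.length_toList, PySem.Str.toList_slice, PySem.Chars.slice_eq_listSlice,
    PySem.List.slice_toNat _ h0 (by omega)]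
  have hL : w.toList.length = w.length := String.length_toList
  simp only [List.length_take, List.length_drop]
  omega

theorem mem_big_iff (w : String) (n k : Int) (g : String)
    (hk1 : 1 ≤ k) (hkn : k < n + 1) (hg : g.length = k.toNat) :
    g ∈ (PySem.List.pyRange 1 (n + 1) 1).flatMap (pvNgrams w) ↔ g ∈ pvNgrams w k := by
  constructor
  · intro h
    rcases List.mem_flatMap.mp h with ⟨j, hj, hgj⟩
    rcases PySem.List.mem_pyRange_one.mp hj with ⟨hj1, hj2⟩
    have := len_mem_pvNgrams w j g hj1 hgj
    have : j = k := by omega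
    subst this; exact hgj
  · intro h
    exact List.mem_flatMap.mpr ⟨k, PySem.List.mem_pyRange_one.mpr ⟨hk1, hkn⟩, h⟩

theorem count_flat_zero (w : String) (ks : List Int) (k : Int) (g : String)
    (hpos : ∀ j ∈ ks, 1 ≤ j) (hk1 : 1 ≤ k) (hg : g.length = k.toNat) (hk : k ∉ ks) :
    (ks.flatMap (pvNgrams w)).count g = 0 := by
  rw [List.count_eq_zero]
  intro h
  rcases List.mem_flatMap.mp h with ⟨j, hj, hgj⟩
  have hj1 := hpos j hj
  have := len_mem_pvNgrams w j g hj1 hgj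
  have : j = k := by omega
  exact hk (this ▸ hj)

theorem count_flat (w : String) (ks : List Int) (k : Int) (g : String)
    (hpos : ∀ j ∈ ks, 1 ≤ j) (hnd : ks.Nodup) (hk1 : 1 ≤ k) (hg : g.length = k.toNat)
    (hk : k ∈ ks) : (ks.flatMap (pvNgrams w)).count g = (pvNgrams w k).count g := by
  induction ks with
  | nil => cases hk
  | cons j ks ih =>
    rw [List.flatMap_cons, List.count_append]
    rcases List.nodup_cons.mp hnd with ⟨hjn, hnd'⟩
    by_cases hjk : j = k
    · subst hjk
      rw [count_flat_zero w ks j g (fun x hx => hpos x (List.mem_cons_of_mem _ hx)) hk1 hg hjn]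
      omega
    · have hkks : k ∈ ks := by
        rcases List.mem_cons.mp hk with h | h
        · exact absurd h.symm hjk
        · exact h
      have hhead : (pvNgrams w j).count g = 0 := by
        rw [List.count_eq_zero]
        intro hgj
        have hj1 := hpos j List.mem_cons_self
        have := len_mem_pvNgrams w j g hj1 hgj
        exact hjk (by omega)
      rw [hhead, ih (fun x hx => hpos x (List.mem_cons_of_mem _ hx)) hnd' hkks]
      omega

theorem fold_len (rmc : PySem.Dict String Int) (ps : List (String × Int)) (cs : List Int) :
    (ps.foldl (pvUpd rmc) cs).length = cs.length := by
  induction ps generalizing cs with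
  | nil => rfl
  | cons p ps ih => rw [List.foldl_cons, ih]; unfold pvUpd; exact PySem.List.length_pySetD _ _ _

theorem fold_val (rmc : PySem.Dict String Int) (ps : List (String × Int)) (cs : List Int)
    (hlen : ∀ p ∈ ps, 1 ≤ p.1.length ∧ p.1.length ≤ cs.length) (j : Nat) (hj : j < cs.length) :
    (ps.foldl (pvUpd rmc) cs).getD j 0
      = cs.getD j 0 + ((ps.filter (fun p => p.1.length == j + 1)).map (pvM rmc)).sum := by
  induction ps generalizing cs with
  | nil => simp
  | cons p ps ih =>
    rcases hlen p List.mem_cons_self with ⟨hp1, hp2⟩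
    have hidx : ((p.1.length : Int) - 1) = ((p.1.length - 1 : Nat) : Int) := by omega
    have hupd : pvUpd rmc cs p
        = cs.set (p.1.length - 1) (cs.getD (p.1.length - 1) 0 + pvM rmc p) := by
      unfold pvUpd
      rw [hidx, PySem.List.pySetD_natCast, PySem.List.pyGetD_natCast]
    have hj' : j < (cs.set (p.1.length - 1) (cs.getD (p.1.length - 1) 0 + pvM rmc p)).length := by
      rw [List.length_set]; exact hj
    rw [List.foldl_cons, hupd,
      ih _ (fun q hq => by
        have := hlen q (List.mem_cons_of_mem _ hq)
        simpa [List.length_set] using this) (by rw [List.length_set]; exact hj),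
      List.filter_cons]
    by_cases hmatch : p.1.length = j + 1
    · have hij : p.1.length - 1 = j := by omega
      rw [if_pos (by simp [hmatch]), List.map_cons, List.sum_cons,
        List.getD_eq_getElem _ _ hj', List.getElem_set, if_pos hij, hij,
        List.getD_eq_getElem _ _ hj]
      ring
    · rw [if_neg (by simp [hmatch])]
      congr 1
      rw [List.getD_eq_getElem _ _ hj', List.getElem_set, if_neg (by omega),
        List.getD_eq_getElem _ _ hj]

theorem correct_eq (w : String) (rmc : PySem.Dict String Int) (n : Int) :
    ((PySem.Dict.counter ((PySem.List.pyRange 1 (n + 1) 1).flatMap (pvNgrams w))).items.foldl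
        (pvUpd rmc) (List.replicate n.toNat 0))
    = (PySem.List.pyRange 1 (n + 1) 1).map (fun k =>
        ((PySem.Dict.counter (pvNgrams w k)).items.map (pvM rmc)).sum) := by
  have hlenL : ((PySem.Dict.counter ((PySem.List.pyRange 1 (n + 1) 1).flatMap (pvNgrams w))).items.foldl
      (pvUpd rmc) (List.replicate n.toNat (0 : Int))).length = n.toNat := by
    rw [fold_len, List.length_replicate]
  have hlenR : ((PySem.List.pyRange 1 (n + 1) 1).map (fun k =>
      ((PySem.Dict.counter (pvNgrams w k)).items.map (pvM rmc)).sum)).length = n.toNat := by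
    rw [List.length_map, PySem.List.length_pyRange_one]
    omega
  have hitems : ∀ p ∈ (PySem.Dict.counter ((PySem.List.pyRange 1 (n + 1) 1).flatMap (pvNgrams w))).items,
      1 ≤ p.1.length ∧ p.1.length ≤ (List.replicate n.toNat (0 : Int)).length := by
    intro p hp
    rw [PySem.Dict.items_counter] at hp
    rcases List.mem_map.mp hp with ⟨g, hg, rfl⟩
    have hgb : g ∈ (PySem.List.pyRange 1 (n + 1) 1).flatMap (pvNgrams w) :=
      (PySem.Set.mem_ofList _ _).mp hg
    rcases List.mem_flatMap.mp hgb with ⟨k, hk, hgk⟩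
    rcases PySem.List.mem_pyRange_one.mp hk with ⟨hk1, hk2⟩
    have hlen := len_mem_pvNgrams w k g hk1 hgk
    refine ⟨?_, ?_⟩
    · show 1 ≤ g.length
      omega
    · show g.length ≤ (List.replicate n.toNat (0 : Int)).length
      rw [List.length_replicate]
      omega
  apply List.ext_getElem (by rw [hlenL, hlenR])
  intro j hj1 hj2
  have hjn : j < n.toNat := by rw [hlenL] at hj1; exact hj1
  have hcs : j < (List.replicate n.toNat (0 : Int)).length := by
    rw [List.length_replicate]; exact hjn
  rw [← List.getD_eq_getElem _ 0 hj1, fold_val rmc _ _ hitems j hcs,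
    List.getD_eq_getElem _ _ hcs, List.getElem_replicate]
  rw [List.getElem_map, PySem.List.getElem_pyRange_one]
  set k : Int := 1 + (j : Int) with hkdef
  have hk1 : 1 ≤ k := by omega
  have hk2 : k < n + 1 := by omega
  have hkt : k.toNat = j + 1 := by omega
  rw [PySem.Dict.items_counter, List.filter_map, List.map_map]
  rw [PySem.Dict.items_counter (pvNgrams w k), List.map_map]
  have hperm : List.Perm
      ((PySem.Set.ofList ((PySem.List.pyRange 1 (n + 1) 1).flatMap (pvNgrams w))).filter
        ((fun p => p.1.length == j + 1) ∘ (fun g => (g, ((( (PySem.List.pyRange 1 (n + 1) 1).flatMap (pvNgrams w)).count g : Int))))))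
      (PySem.Set.ofList (pvNgrams w k)) := by
    apply (List.perm_ext_iff_of_nodup
      (List.Nodup.filter _ (PySem.Set.nodup_ofList _)) (PySem.Set.nodup_ofList _)).mpr
    intro g
    rw [List.mem_filter, PySem.Set.mem_ofList, PySem.Set.mem_ofList]
    simp only [Function.comp]
    constructor
    · rintro ⟨hgb, hglen⟩
      have hglen' : g.length = k.toNat := by
        have : g.length = j + 1 := by simpa using hglen
        omega
      exact (mem_big_iff w n k g hk1 hk2 hglen').mp hgb
    · intro hgk
      have hglen := len_mem_pvNgrams w k g hk1 hgk
      refine ⟨(mem_big_iff w n k g hk1 hk2 hglen).mpr hgk, ?_⟩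
      simp [hglen, hkt]
  have hmaps : ∀ g ∈ (PySem.Set.ofList ((PySem.List.pyRange 1 (n + 1) 1).flatMap (pvNgrams w))).filter
        ((fun p => p.1.length == j + 1) ∘ (fun g => (g, ((((PySem.List.pyRange 1 (n + 1) 1).flatMap (pvNgrams w)).count g : Int))))),
      (pvM rmc ∘ fun g => (g, ((((PySem.List.pyRange 1 (n + 1) 1).flatMap (pvNgrams w)).count g : Int)))) g
        = (pvM rmc ∘ fun g => (g, (((pvNgrams w k).count g : Int)))) g := by
    intro g hgf
    rcases List.mem_filter.mp hgf with ⟨hgS, hglen⟩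
    simp only [Function.comp] at hglen ⊢
    have hglen' : g.length = k.toNat := by
      have : g.length = j + 1 := by simpa using hglen
      omega
    rw [count_flat w _ k g (fun x hx => (PySem.List.mem_pyRange_one.mp hx).1)
      (PySem.List.nodup_pyRange_one 1 (n + 1)) hk1 hglen'
      (PySem.List.mem_pyRange_one.mpr ⟨hk1, hk2⟩)]
  rw [List.map_congr_left hmaps]
  rw [(hperm.map (pvM rmc ∘ fun g => (g, (((pvNgrams w k).count g : Int))))).sum_eq]
  simp

-- ===== B-side lemmas =====

-- a 0/1 indicator sum over mapped elements is a count
theorem sum_ite_eq_count {α : Type} (l : List α) (f : α → String) (g : String) :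
    (l.map (fun i => if f i == g then (1 : Int) else 0)).sum = ((l.map f).count g : Int) := by
  induction l with
  | nil => simp
  | cons a l ih =>
    rw [List.map_cons, List.sum_cons, List.map_cons, List.count_cons, ih]
    by_cases h : f a = g
    · rw [if_pos (by simp [h]), if_pos (by simp [h])]
      push_cast; ring
    · rw [if_neg (by simp [h]), if_neg (by simp [h])]
      push_cast; ring

theorem occ_eq_count (w : String) (g : String) (k : Int) (hg : (g.length : Int) = k) :
    bOcc w k g = ((pvNgrams w k).count g : Int) := by
  unfold bOcc pvNgrams
  exact sum_ite_eq_count _ _ _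

theorem foldB_len (w : String) (n : Int) (ps : List (String × Int)) (cs : List Int) :
    (ps.foldl (bUpd w n) cs).length = cs.length := by
  induction ps generalizing cs with
  | nil => rfl
  | cons p ps ih =>
    rw [List.foldl_cons, ih]
    unfold bUpd
    dsimp only
    split_ifs with h1 h2
    · exact PySem.List.length_pySetD _ _ _
    · rfl
    · rfl

theorem foldB_val (w : String) (n : Int) (ps : List (String × Int)) (cs : List Int)
    (hlen : cs.length = n.toNat) (j : Nat) (hj : j < cs.length) :
    (ps.foldl (bUpd w n) cs).getD j 0 = cs.getD j 0 +
      ((ps.filter (fun p => p.1.length == j + 1 && !(bOcc w ((j : Int) + 1) p.1 == 0))).map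
        (fun p => min p.2 (bOcc w ((j : Int) + 1) p.1))).sum := by
  induction ps generalizing cs with
  | nil => simp
  | cons p ps ih =>
    rw [List.foldl_cons, List.filter_cons]
    by_cases hm : p.1.length = j + 1
    · -- same length slot: the guard necessarily holds
      have hk : ((p.1.length : Int)) = (j : Int) + 1 := by omega
      have hG : 1 ≤ ((p.1.length : Int)) ∧ ((p.1.length : Int)) ≤ n := by
        constructor <;> omega
      by_cases ho : bOcc w ((j : Int) + 1) p.1 = 0
      · -- occ = 0: no update, item filtered out
        have : bUpd w n cs p = cs := by
          unfold bUpd; dsimp only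
          rw [if_pos hG, hk, if_neg (by simpa using ho)]
        rw [this, if_neg (by simp [hm, ho]), ih cs hlen hj]
      · -- occ ≠ 0: update slot j
        have hidx : ((p.1.length : Int) - 1) = ((j : Nat) : Int) := by omega
        have hupd : bUpd w n cs p
            = cs.set j (cs.getD j 0 + min p.2 (bOcc w ((j : Int) + 1) p.1)) := by
          unfold bUpd; dsimp only
          rw [if_pos hG, hk, if_pos (by simpa using ho), ← hk, hidx,
            PySem.List.pySetD_natCast, PySem.List.pyGetD_natCast, hk]
        have hj' : j < (cs.set j (cs.getD j 0 + min p.2 (bOcc w ((j : Int) + 1) p.1))).length := by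
          rw [List.length_set]; exact hj
        rw [hupd, ih _ (by rw [List.length_set]; exact hlen) (by rw [List.length_set]; exact hj),
          if_pos (by simp [hm, ho]), List.map_cons, List.sum_cons,
          List.getD_eq_getElem _ _ hj', List.getElem_set, if_pos rfl,
          List.getD_eq_getElem _ _ hj]
        ring
    · -- different length: slot j untouched whatever the branches do
      have hfilter : ¬(p.1.length == j + 1 && !(bOcc w ((j : Int) + 1) p.1 == 0)) = true := by
        simp [hm]
    -- case on the guard / occ branches
      by_cases hG : 1 ≤ ((p.1.length : Int)) ∧ ((p.1.length : Int)) ≤ n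
      · by_cases ho : bOcc w ((p.1.length : Int)) p.1 = 0
        · have : bUpd w n cs p = cs := by
            unfold bUpd; dsimp only
            rw [if_pos hG, if_neg (by simpa using ho)]
          rw [this, if_neg hfilter, ih cs hlen hj]
        · have hidx : ((p.1.length : Int) - 1) = ((p.1.length - 1 : Nat) : Int) := by omega
          have hupd : bUpd w n cs p
              = cs.set (p.1.length - 1)
                  (cs.getD (p.1.length - 1) 0 + min p.2 (bOcc w ((p.1.length : Int)) p.1)) := by
            unfold bUpd; dsimp only
            rw [if_pos hG, if_pos (by simpa using ho), hidx,
              PySem.List.pySetD_natCast, PySem.List.pyGetD_natCast]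
          have hj' : j < (cs.set (p.1.length - 1)
              (cs.getD (p.1.length - 1) 0 + min p.2 (bOcc w ((p.1.length : Int)) p.1))).length := by
            rw [List.length_set]; exact hj
          rw [hupd, ih _ (by rw [List.length_set]; exact hlen)
              (by rw [List.length_set]; exact hj),
            if_neg hfilter]
          congr 1
          rw [List.getD_eq_getElem _ _ hj', List.getElem_set, if_neg (by omega),
            List.getD_eq_getElem _ _ hj]
      · have : bUpd w n cs p = cs := by
          unfold bUpd; dsimp only
          rw [if_neg hG]
        rw [this, if_neg hfilter, ih cs hlen hj]

-- dropping zero summands outside a filter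
theorem sum_map_filter_zero {α : Type} (l : List α) (p : α → Bool) (f : α → Int)
    (h : ∀ x ∈ l, p x = false → f x = 0) :
    (l.map f).sum = ((l.filter p).map f).sum := by
  induction l with
  | nil => rfl
  | cons a l ih =>
    rw [List.map_cons, List.sum_cons, List.filter_cons]
    by_cases hp : p a = true
    · rw [if_pos hp, List.map_cons, List.sum_cons,
        ih (fun x hx => h x (List.mem_cons_of_mem _ hx))]
    · rw [if_neg hp, h a List.mem_cons_self (by simpa using hp),
        ih (fun x hx => h x (List.mem_cons_of_mem _ hx)), zero_add]

-- per-slot bridge: B's filtered reference scan computes A's per-length counter sum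
theorem slot_eq (w : String) (rmc : PySem.Dict String Int) (hnd : rmc.keys.Nodup)
    (j : Nat) (k : Int) (hk : k = 1 + (j : Int)) :
    ((rmc.items.filter (fun p => p.1.length == j + 1 && !(bOcc w ((j : Int) + 1) p.1 == 0))).map
        (fun p => min p.2 (bOcc w ((j : Int) + 1) p.1))).sum
      = ((PySem.Dict.counter (pvNgrams w k)).items.map (pvM rmc)).sum := by
  have hk1 : 1 ≤ k := by omega
  have hkt : k.toNat = j + 1 := by omega
  have hkj : ((j : Int) + 1) = k := by omega
  set ngs := pvNgrams w k with hngs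
  set Q : String × Int → Bool :=
    fun p => p.1.length == j + 1 && !(bOcc w ((j : Int) + 1) p.1 == 0) with hQ
  -- B's side as a sum of pvF over the filtered keys
  have hBmap : ∀ p ∈ rmc.items.filter Q,
      min p.2 (bOcc w ((j : Int) + 1) p.1) = pvF rmc ngs p.1 := by
    intro p hp
    rcases List.mem_filter.mp hp with ⟨hpi, hq⟩
    have hlen : p.1.length = j + 1 := by
      have := (Bool.and_eq_true _ _).mp hq
      simpa using this.1
    have hv : rmc.getD p.1 0 = p.2 :=
      PySem.Dict.getD_of_mem_items rmc (by simpa using hpi) hnd 0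
    simp only [pvF]
    rw [hkj, occ_eq_count w p.1 k (by omega), hv, ← hngs]
  -- A's side restricted to grams present in the reference
  have hAzero : ∀ g ∈ PySem.Set.ofList ngs, rmc.contains g = false → pvF rmc ngs g = 0 := by
    intro g hg hc
    have hcount : 1 ≤ ngs.count g :=
      List.count_pos_iff.mpr ((PySem.Set.mem_ofList _ _).mp hg)
    simp only [pvF]
    rw [PySem.Dict.getD_of_not_contains rmc 0 hc]
    omega
  have hA : ((PySem.Dict.counter ngs).items.map (pvM rmc)).sum
      = (((PySem.Set.ofList ngs).filter (fun g => rmc.contains g)).map (pvF rmc ngs)).sum := by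
    rw [PySem.Dict.items_counter, List.map_map]
    have : (pvM rmc ∘ fun g => (g, ((ngs.count g : Int)))) = pvF rmc ngs := rfl
    rw [this, sum_map_filter_zero _ (fun g => rmc.contains g) _ hAzero]
  -- B's key list and A's filtered set are permutations of each other
  have hndB : ((rmc.items.filter Q).map Prod.fst).Nodup := by
    have hsub : List.Sublist ((rmc.items.filter Q).map Prod.fst) (rmc.items.map Prod.fst) :=
      List.Sublist.map _ List.filter_sublist
    exact hnd.sublist hsub
  have hmem : ∀ g, g ∈ (rmc.items.filter Q).map Prod.fst
      ↔ g ∈ (PySem.Set.ofList ngs).filter (fun g => rmc.contains g) := by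
    intro g
    rw [List.mem_map, List.mem_filter, PySem.Set.mem_ofList]
    constructor
    · rintro ⟨p, hp, rfl⟩
      rcases List.mem_filter.mp hp with ⟨hpi, hq⟩
      rcases (Bool.and_eq_true _ _).mp hq with ⟨hlen, hocc⟩
      have hlen' : p.1.length = j + 1 := by simpa using hlen
      have hocc' : bOcc w ((j : Int) + 1) p.1 ≠ 0 := by simpa using hocc
      rw [hkj, occ_eq_count w p.1 k (by omega)] at hocc'
      have hne : ngs.count p.1 ≠ 0 := by
        rw [hngs]; exact_mod_cast hocc'
      refine ⟨List.count_pos_iff.mp (Nat.pos_of_ne_zero hne), ?_⟩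
      rw [PySem.Dict.contains_iff_mem_keys]
      exact PySem.Dict.mem_keys_of_mem_items rmc hpi
    · rintro ⟨hg, hc⟩
      have hlen : g.length = j + 1 := by
        have := len_mem_pvNgrams w k g hk1 hg
        omega
      have hkeys : g ∈ rmc.keys := (PySem.Dict.contains_iff_mem_keys _ _).mp hc
      rcases List.mem_map.mp hkeys with ⟨p, hpi, rfl⟩
      refine ⟨p, List.mem_filter.mpr ⟨hpi, ?_⟩, rfl⟩
      have hocc : bOcc w ((j : Int) + 1) p.1 ≠ 0 := by
        rw [hkj, occ_eq_count w p.1 k (by omega)]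
        have : 0 < ngs.count p.1 := List.count_pos_iff.mpr hg
        exact_mod_cast Nat.pos_iff_ne_zero.mp this
      simp [hQ, hlen, hocc]
  have hperm : List.Perm ((rmc.items.filter Q).map Prod.fst)
      ((PySem.Set.ofList ngs).filter (fun g => rmc.contains g)) :=
    (List.perm_ext_iff_of_nodup hndB (List.Nodup.filter _ (PySem.Set.nodup_ofList _))).mpr hmem
  rw [List.map_congr_left hBmap, hA]
  have : ((rmc.items.filter Q).map (pvF rmc ngs ∘ Prod.fst)).sum
      = (((rmc.items.filter Q).map Prod.fst).map (pvF rmc ngs)).sum := by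
    rw [List.map_map]
  rw [show (fun p : String × Int => pvF rmc ngs p.1) = pvF rmc ngs ∘ Prod.fst from rfl, this,
    (hperm.map (pvF rmc ngs)).sum_eq]

-- B's whole correct list equals A's per-k sums
theorem correct_alt_eq (w : String) (rmc : PySem.Dict String Int) (hnd : rmc.keys.Nodup)
    (n : Int) :
    rmc.items.foldl (bUpd w n) (List.replicate n.toNat 0)
      = (PySem.List.pyRange 1 (n + 1) 1).map (fun k =>
          ((PySem.Dict.counter (pvNgrams w k)).items.map (pvM rmc)).sum) := by
  have hlenL : (rmc.items.foldl (bUpd w n) (List.replicate n.toNat (0 : Int))).length = n.toNat := by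
    rw [foldB_len, List.length_replicate]
  have hlenR : ((PySem.List.pyRange 1 (n + 1) 1).map (fun k =>
      ((PySem.Dict.counter (pvNgrams w k)).items.map (pvM rmc)).sum)).length = n.toNat := by
    rw [List.length_map, PySem.List.length_pyRange_one]
    omega
  apply List.ext_getElem (by rw [hlenL, hlenR])
  intro j hj1 hj2
  have hjn : j < n.toNat := by rw [hlenL] at hj1; exact hj1
  have hcs : j < (List.replicate n.toNat (0 : Int)).length := by
    rw [List.length_replicate]; exact hjn
  rw [← List.getD_eq_getElem _ 0 hj1,
    foldB_val w n rmc.items _ (List.length_replicate) j hcs,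
    List.getD_eq_getElem _ _ hcs, List.getElem_replicate,
    List.getElem_map, PySem.List.getElem_pyRange_one,
    slot_eq w rmc hnd j (1 + (j : Int)) rfl, zero_add]

-- ===== VERDICT (by name: the statement is the Claim_ definition above) =====
theorem cook_test_spec : Claim_equal_cook_test := by
  intro test refparam n _dom
  unfold Spec_cook_test cook_test cook_test_alt
  dsimp only
  rw [precook_eq]
  have hA := correct_eq (PySem.Str.replace test " " "") (PySem.Dict.ofList refparam.2) n
  have hB := correct_alt_eq (PySem.Str.replace test " " "")
    (PySem.Dict.ofList refparam.2) (PySem.Dict.nodup_keys_ofList _) n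
  exact congrArg
    (fun c => [("guess", (PySem.List.pyRange 1 (n + 1) 1).map (fun k => max 0 (refparam.1 - k + 1))),
      ("correct", c)])
    (hA.trans hB.symm)
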